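-- pv_equiv track=rewrite | github.com/vikrant7/voxel-based-3d-reconstruction | main.py | Bresenham3D
-- ===== SOURCE A (Python) =====
-- def Bresenham3D(start, end):#, pg_voxel_index):
-- 	x1 = start[0]
-- 	y1 = start[1]
-- 	z1 = start[2]
-- 	x2 = end[0]
-- 	y2 = end[1]
-- 	z2 = end[2]
-- 	ListOfPoints = []
-- 	ListOfPoints.append((x1, y1, z1))
-- 	dx = abs(x2 - x1)
-- 	dy = abs(y2 - y1)
-- 	dz = abs(z2 - z1)
-- 	if (x2 > x1):
-- 		xs = 1
-- 	else:
-- 		xs = -1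
-- 	if (y2 > y1):
-- 		ys = 1
-- 	else:
-- 		ys = -1
-- 	if (z2 > z1):
-- 		zs = 1
-- 	else:
-- 		zs = -1
--
-- 	# Driving axis is X-axis"
-- 	if (dx >= dy and dx >= dz):
-- 		p1 = 2 * dy - dx
-- 		p2 = 2 * dz - dx
-- 		while (x1 != x2):
-- 			x1 += xs
-- 			if (p1 >= 0):
-- 				y1 += ys
-- 				p1 -= 2 * dx
-- 			if (p2 >= 0):
-- 				z1 += zs
-- 				p2 -= 2 * dx
-- 			p1 += 2 * dy
-- 			p2 += 2 * dz
-- 			ListOfPoints.append([x1, y1, z1])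
--
-- 	# Driving axis is Y-axis"
-- 	elif (dy >= dx and dy >= dz):
-- 		p1 = 2 * dx - dy
-- 		p2 = 2 * dz - dy
-- 		while (y1 != y2):
-- 			y1 += ys
-- 			if (p1 >= 0):
-- 				x1 += xs
-- 				p1 -= 2 * dy
-- 			if (p2 >= 0):
-- 				z1 += zs
-- 				p2 -= 2 * dy
-- 			p1 += 2 * dx
-- 			p2 += 2 * dz
-- 			ListOfPoints.append([x1, y1, z1])
--
-- 	# Driving axis is Z-axis"
-- 	else:
-- 		p1 = 2 * dy - dz
-- 		p2 = 2 * dx - dz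
-- 		while (z1 != z2):
-- 			z1 += zs
-- 			if (p1 >= 0):
-- 				y1 += ys
-- 				p1 -= 2 * dz
-- 			if (p2 >= 0):
-- 				x1 += xs
-- 				p2 -= 2 * dz
-- 			p1 += 2 * dy
-- 			p2 += 2 * dx
-- 			ListOfPoints.append([x1, y1, z1])
-- 	return ListOfPoints
-- ===== SOURCE B (Python) =====
-- def Bresenham3D(start, end):
--     x1, y1, z1 = start[0], start[1], start[2]
--     x2, y2, z2 = end[0], end[1], end[2]
--     dx, dy, dz = abs(x2 - x1), abs(y2 - y1), abs(z2 - z1)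
--     xs = 1 if x2 > x1 else -1
--     ys = 1 if y2 > y1 else -1
--     zs = 1 if z2 > z1 else -1
--     pts = [(x1, y1, z1)]
--     if dx >= dy and dx >= dz:
--         n = dx
--         for k in range(1, n + 1):
--             pts.append([x1 + xs * k,
--                         y1 + ys * ((2 * k * dy + n) // (2 * n)),
--                         z1 + zs * ((2 * k * dz + n) // (2 * n))])
--     elif dy >= dx and dy >= dz:
--         n = dy
--         for k in range(1, n + 1):
--             pts.append([x1 + xs * ((2 * k * dx + n) // (2 * n)),
--                         y1 + ys * k,
--                         z1 + zs * ((2 * k * dz + n) // (2 * n))])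
--     else:
--         n = dz
--         for k in range(1, n + 1):
--             pts.append([x1 + xs * ((2 * k * dx + n) // (2 * n)),
--                         y1 + ys * ((2 * k * dy + n) // (2 * n)),
--                         z1 + zs * k])
--     return pts
-- ===== Notes on version B (the rewrite author's own statement) =====
-- stated objective: alternative
-- what changed: Replaced A's three stateful Bresenham error-accumulator while-loops (p1/p2 carried across iterations) by a stateless per-index closed form: point k is computed directly from k as start + sign*((2*k*d_other + n)//(2*n)) over range(1, n+1), which reproduces the p>=0 tie-breaking exactly.
import Mathlib
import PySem

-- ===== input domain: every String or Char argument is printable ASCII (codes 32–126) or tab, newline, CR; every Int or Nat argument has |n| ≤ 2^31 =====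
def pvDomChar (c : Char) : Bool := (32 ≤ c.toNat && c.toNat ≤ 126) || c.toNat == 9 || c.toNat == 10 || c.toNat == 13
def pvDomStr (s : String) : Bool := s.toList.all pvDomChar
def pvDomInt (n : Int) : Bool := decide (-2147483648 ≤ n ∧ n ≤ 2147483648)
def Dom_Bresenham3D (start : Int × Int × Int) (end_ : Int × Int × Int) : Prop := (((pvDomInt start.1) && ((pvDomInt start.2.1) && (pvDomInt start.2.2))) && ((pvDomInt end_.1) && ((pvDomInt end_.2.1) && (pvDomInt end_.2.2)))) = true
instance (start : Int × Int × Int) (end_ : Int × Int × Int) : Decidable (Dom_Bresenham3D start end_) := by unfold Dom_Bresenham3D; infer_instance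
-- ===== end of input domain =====

-- B replaces A's three stateful error-accumulator while-loops by a direct per-index
-- closed form: point k is computed from k alone by integer division ((2*k*d + n) // (2*n)).

-- ===== PORT A =====
-- while (x1 != x2): … (fuel = dx iterations suffice; the guard is still checked each step)
def pvLoopX (fuel : Nat) (x1 y1 z1 x2 xs ys zs dx dy dz p1 p2 : Int)
    (acc : List (List Int)) : List (List Int) :=
  match fuel with
  | 0 => acc
  | Nat.succ n =>
    if x1 ≠ x2 then
      pvLoopX n (x1 + xs)
        (if p1 ≥ 0 then y1 + ys else y1)
        (if p2 ≥ 0 then z1 + zs else z1)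
        x2 xs ys zs dx dy dz
        ((if p1 ≥ 0 then p1 - 2*dx else p1) + 2*dy)
        ((if p2 ≥ 0 then p2 - 2*dx else p2) + 2*dz)
        (acc ++ [[x1 + xs, (if p1 ≥ 0 then y1 + ys else y1), (if p2 ≥ 0 then z1 + zs else z1)]])
    else acc

def pvLoopY (fuel : Nat) (x1 y1 z1 y2 xs ys zs dx dy dz p1 p2 : Int)
    (acc : List (List Int)) : List (List Int) :=
  match fuel with
  | 0 => acc
  | Nat.succ n =>
    if y1 ≠ y2 then
      pvLoopY n
        (if p1 ≥ 0 then x1 + xs else x1)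
        (y1 + ys)
        (if p2 ≥ 0 then z1 + zs else z1)
        y2 xs ys zs dx dy dz
        ((if p1 ≥ 0 then p1 - 2*dy else p1) + 2*dx)
        ((if p2 ≥ 0 then p2 - 2*dy else p2) + 2*dz)
        (acc ++ [[(if p1 ≥ 0 then x1 + xs else x1), y1 + ys, (if p2 ≥ 0 then z1 + zs else z1)]])
    else acc

def pvLoopZ (fuel : Nat) (x1 y1 z1 z2 xs ys zs dx dy dz p1 p2 : Int)
    (acc : List (List Int)) : List (List Int) :=
  match fuel with
  | 0 => acc
  | Nat.succ n =>
    if z1 ≠ z2 then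
      pvLoopZ n
        (if p2 ≥ 0 then x1 + xs else x1)
        (if p1 ≥ 0 then y1 + ys else y1)
        (z1 + zs)
        z2 xs ys zs dx dy dz
        ((if p1 ≥ 0 then p1 - 2*dz else p1) + 2*dy)
        ((if p2 ≥ 0 then p2 - 2*dz else p2) + 2*dx)
        (acc ++ [[(if p2 ≥ 0 then x1 + xs else x1), (if p1 ≥ 0 then y1 + ys else y1), z1 + zs]])
    else acc

def Bresenham3D (start : Int × Int × Int) (end_ : Int × Int × Int) : List (List Int) :=
  let x1 := start.1
  let y1 := start.2.1
  let z1 := start.2.2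
  let x2 := end_.1
  let y2 := end_.2.1
  let z2 := end_.2.2
  let listOfPoints : List (List Int) := [[x1, y1, z1]]
  let dx := |x2 - x1|
  let dy := |y2 - y1|
  let dz := |z2 - z1|
  let xs : Int := if x2 > x1 then 1 else -1
  let ys : Int := if y2 > y1 then 1 else -1
  let zs : Int := if z2 > z1 then 1 else -1
  if dx ≥ dy ∧ dx ≥ dz then
    pvLoopX dx.toNat x1 y1 z1 x2 xs ys zs dx dy dz (2*dy - dx) (2*dz - dx) listOfPoints
  else if dy ≥ dx ∧ dy ≥ dz then
    pvLoopY dy.toNat x1 y1 z1 y2 xs ys zs dx dy dz (2*dx - dy) (2*dz - dy) listOfPoints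
  else
    pvLoopZ dz.toNat x1 y1 z1 z2 xs ys zs dx dy dz (2*dy - dz) (2*dx - dz) listOfPoints

-- ===== PORT B =====
def Bresenham3D_alt (start : Int × Int × Int) (end_ : Int × Int × Int) : List (List Int) :=
  let x1 := start.1
  let y1 := start.2.1
  let z1 := start.2.2
  let x2 := end_.1
  let y2 := end_.2.1
  let z2 := end_.2.2
  let dx := |x2 - x1|
  let dy := |y2 - y1|
  let dz := |z2 - z1|
  let xs : Int := if x2 > x1 then 1 else -1
  let ys : Int := if y2 > y1 then 1 else -1
  let zs : Int := if z2 > z1 then 1 else -1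
  if dx ≥ dy ∧ dx ≥ dz then
    [x1, y1, z1] :: (PySem.List.pyRange 1 (dx + 1) 1).map (fun k =>
      [x1 + xs * k,
       y1 + ys * PySem.Int.floordiv (2*k*dy + dx) (2*dx),
       z1 + zs * PySem.Int.floordiv (2*k*dz + dx) (2*dx)])
  else if dy ≥ dx ∧ dy ≥ dz then
    [x1, y1, z1] :: (PySem.List.pyRange 1 (dy + 1) 1).map (fun k =>
      [x1 + xs * PySem.Int.floordiv (2*k*dx + dy) (2*dy),
       y1 + ys * k,
       z1 + zs * PySem.Int.floordiv (2*k*dz + dy) (2*dy)])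
  else
    [x1, y1, z1] :: (PySem.List.pyRange 1 (dz + 1) 1).map (fun k =>
      [x1 + xs * PySem.Int.floordiv (2*k*dx + dz) (2*dz),
       y1 + ys * PySem.Int.floordiv (2*k*dy + dz) (2*dz),
       z1 + zs * k])

-- ===== PRECONDITION & SPEC =====
def Spec_Bresenham3D (start : Int × Int × Int) (end_ : Int × Int × Int) (out : List (List Int)) : Prop := out = Bresenham3D_alt start end_
instance (start : Int × Int × Int) (end_ : Int × Int × Int) (out : List (List Int)) : Decidable (Spec_Bresenham3D start end_ out) := by unfold Spec_Bresenham3D; infer_instance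

-- ===== CLAIM (what is proved, stated in full; the proofs are below) =====
def Claim_equal_Bresenham3D : Prop := ∀ (start : Int × Int × Int) (end_ : Int × Int × Int), Dom_Bresenham3D start end_ → Spec_Bresenham3D start end_ (Bresenham3D start end_)

-- ===== LEMMAS AND PROOFS =====

-- closed-form count of secondary-axis steps after k driving steps
def pvE (d e k : Int) : Int := PySem.Int.floordiv (2*k*e + d) (2*d)

lemma pvE_zero (d e : Int) (hd : 0 < d) : pvE d e 0 = 0 := by
  unfold pvE
  rw [show 2*(0:Int)*e + d = d by ring, PySem.Int.floordiv_eq_iff_of_pos (by omega)]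
  omega

lemma pvE_succ (d e k : Int) (hd : 0 < d) (he : 0 ≤ e) (hed : e ≤ d) :
    pvE d e (k+1) = pvE d e k + (if 2*(k+1)*e - d - 2*d*pvE d e k ≥ 0 then 1 else 0) := by
  have hb : (0:Int) < 2*d := by omega
  have hq := (PySem.Int.floordiv_eq_iff_of_pos hb).mp
    (rfl : PySem.Int.floordiv (2*k*e + d) (2*d) = PySem.Int.floordiv (2*k*e + d) (2*d))
  simp only [pvE]
  rw [PySem.Int.floordiv_eq_iff_of_pos hb]
  split_ifs with h
  · constructor <;> nlinarith [hq.1, hq.2]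
  · constructor <;> nlinarith [hq.1, hq.2]

-- generic version of A's three loops (mk packs the coordinates in the branch's order)
def pvG (mk : Int → Int → Int → List Int) (fuel : Nat)
    (a b c a2 sa sb sc d e f p1 p2 : Int) (acc : List (List Int)) : List (List Int) :=
  match fuel with
  | 0 => acc
  | Nat.succ n =>
    if a ≠ a2 then
      pvG mk n (a + sa)
        (if p1 ≥ 0 then b + sb else b)
        (if p2 ≥ 0 then c + sc else c)
        a2 sa sb sc d e f
        ((if p1 ≥ 0 then p1 - 2*d else p1) + 2*e)
        ((if p2 ≥ 0 then p2 - 2*d else p2) + 2*f)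
        (acc ++ [mk (a + sa) (if p1 ≥ 0 then b + sb else b) (if p2 ≥ 0 then c + sc else c)])
    else acc

lemma pvLoopX_eq_pvG (fuel : Nat) (x1 y1 z1 x2 xs ys zs dx dy dz p1 p2 : Int) (acc : List (List Int)) :
    pvLoopX fuel x1 y1 z1 x2 xs ys zs dx dy dz p1 p2 acc
      = pvG (fun a b c => [a, b, c]) fuel x1 y1 z1 x2 xs ys zs dx dy dz p1 p2 acc := by
  induction fuel generalizing x1 y1 z1 p1 p2 acc with
  | zero => rfl
  | succ n ih => rw [pvLoopX, pvG]; split_ifs <;> simp [ih]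

lemma pvLoopY_eq_pvG (fuel : Nat) (x1 y1 z1 y2 xs ys zs dx dy dz p1 p2 : Int) (acc : List (List Int)) :
    pvLoopY fuel x1 y1 z1 y2 xs ys zs dx dy dz p1 p2 acc
      = pvG (fun a b c => [b, a, c]) fuel y1 x1 z1 y2 ys xs zs dy dx dz p1 p2 acc := by
  induction fuel generalizing x1 y1 z1 p1 p2 acc with
  | zero => rfl
  | succ n ih => rw [pvLoopY, pvG]; split_ifs <;> simp [ih]

lemma pvLoopZ_eq_pvG (fuel : Nat) (x1 y1 z1 z2 xs ys zs dx dy dz p1 p2 : Int) (acc : List (List Int)) :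
    pvLoopZ fuel x1 y1 z1 z2 xs ys zs dx dy dz p1 p2 acc
      = pvG (fun a b c => [c, b, a]) fuel z1 y1 x1 z2 zs ys xs dz dy dx p1 p2 acc := by
  induction fuel generalizing x1 y1 z1 p1 p2 acc with
  | zero => rfl
  | succ n ih => rw [pvLoopZ, pvG]; split_ifs <;> simp [ih]

lemma pvG_eq (mk : Int → Int → Int → List Int) (d e f : Int)
    (hd : 0 < d) (he : 0 ≤ e) (hed : e ≤ d) (hf : 0 ≤ f) (hfd : f ≤ d)
    (sa sb sc : Int) (hsa : sa = 1 ∨ sa = -1) (a0 b0 c0 : Int) :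
    ∀ (m : Nat) (k : Int), 0 ≤ k → k + m = d → ∀ acc : List (List Int),
      pvG mk m (a0 + sa*k) (b0 + sb*pvE d e k) (c0 + sc*pvE d f k) (a0 + sa*d) sa sb sc d e f
        (2*(k+1)*e - d - 2*d*pvE d e k) (2*(k+1)*f - d - 2*d*pvE d f k) acc
      = acc ++ (PySem.List.pyRange (k+1) (d+1) 1).map (fun j =>
          mk (a0 + sa*j) (b0 + sb*pvE d e j) (c0 + sc*pvE d f j)) := by
  intro m
  induction m with
  | zero =>
    intro k hk hkm acc
    rw [PySem.List.pyRange_one_eq_nil (by omega : d + 1 ≤ k + 1)]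
    simp [pvG]
  | succ n ih =>
    intro k hk hkm acc
    have hcond : a0 + sa*k ≠ a0 + sa*d := by
      rcases hsa with h | h <;> subst h <;> omega
    rw [pvG, if_pos hcond]
    have hEe := pvE_succ d e k hd he hed
    have hEf := pvE_succ d f k hd hf hfd
    have ha : a0 + sa*k + sa = a0 + sa*(k+1) := by ring
    have hb : (if 2*(k+1)*e - d - 2*d*pvE d e k ≥ 0 then b0 + sb*pvE d e k + sb else b0 + sb*pvE d e k)
        = b0 + sb*pvE d e (k+1) := by rw [hEe]; split_ifs <;> ring
    have hc : (if 2*(k+1)*f - d - 2*d*pvE d f k ≥ 0 then c0 + sc*pvE d f k + sc else c0 + sc*pvE d f k)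
        = c0 + sc*pvE d f (k+1) := by rw [hEf]; split_ifs <;> ring
    have hp1 : (if 2*(k+1)*e - d - 2*d*pvE d e k ≥ 0 then 2*(k+1)*e - d - 2*d*pvE d e k - 2*d
          else 2*(k+1)*e - d - 2*d*pvE d e k) + 2*e
        = 2*(k+1+1)*e - d - 2*d*pvE d e (k+1) := by rw [hEe]; split_ifs <;> ring
    have hp2 : (if 2*(k+1)*f - d - 2*d*pvE d f k ≥ 0 then 2*(k+1)*f - d - 2*d*pvE d f k - 2*d
          else 2*(k+1)*f - d - 2*d*pvE d f k) + 2*f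
        = 2*(k+1+1)*f - d - 2*d*pvE d f (k+1) := by rw [hEf]; split_ifs <;> ring
    rw [ha, hb, hc, hp1, hp2, ih (k+1) (by omega) (by omega)]
    rw [PySem.List.pyRange_one_cons (by omega : k + 1 < d + 1), List.map_cons]
    simp [List.append_assoc]

-- e, f are the two deltas off the driving axis; end coordinate = start + sign*delta
lemma pvBranch (mk : Int → Int → Int → List Int) (d e f sa sb sc a0 b0 c0 a2 : Int)
    (hd : 0 ≤ d) (he : 0 ≤ e) (hed : e ≤ d) (hf : 0 ≤ f) (hfd : f ≤ d)
    (hsa : sa = 1 ∨ sa = -1) (ha2 : a2 = a0 + sa*d) :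
    pvG mk d.toNat a0 b0 c0 a2 sa sb sc d e f (2*e - d) (2*f - d) [mk a0 b0 c0]
      = mk a0 b0 c0 :: (PySem.List.pyRange 1 (d + 1) 1).map (fun k =>
          mk (a0 + sa*k) (b0 + sb*PySem.Int.floordiv (2*k*e + d) (2*d))
             (c0 + sc*PySem.Int.floordiv (2*k*f + d) (2*d))) := by
  subst ha2
  rcases eq_or_lt_of_le hd with h0 | hd'
  · have hdz : d = 0 := h0.symm
    subst hdz
    rw [PySem.List.pyRange_one_eq_nil (by norm_num : (0:Int) + 1 ≤ 1)]
    simp [pvG]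
  · have h1 := pvG_eq mk d e f hd' he hed hf hfd sa sb sc hsa a0 b0 c0 d.toNat 0 le_rfl
      (by omega) [mk a0 b0 c0]
    rw [show a0 + sa*(0:Int) = a0 by ring, pvE_zero d e hd', pvE_zero d f hd',
        show b0 + sb*(0:Int) = b0 by ring, show c0 + sc*(0:Int) = c0 by ring,
        show 2*((0:Int)+1)*e - d - 2*d*0 = 2*e - d by ring,
        show 2*((0:Int)+1)*f - d - 2*d*0 = 2*f - d by ring,
        show (0:Int) + 1 = 1 by ring] at h1
    rw [h1]
    simp only [pvE, List.singleton_append]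

-- ===== VERDICT (by name: the statement is the Claim_ definition above) =====
theorem Bresenham3D_spec : Claim_equal_Bresenham3D := by
  intro start end_ _
  obtain ⟨x1, y1, z1⟩ := start
  obtain ⟨x2, y2, z2⟩ := end_
  unfold Spec_Bresenham3D Bresenham3D Bresenham3D_alt
  simp only
  set dx := |x2 - x1| with hdx
  set dy := |y2 - y1| with hdy
  set dz := |z2 - z1| with hdz
  set sx := (if x2 > x1 then (1:Int) else -1) with hsx
  set sy := (if y2 > y1 then (1:Int) else -1) with hsy
  set sz := (if z2 > z1 then (1:Int) else -1) with hsz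
  have hdx0 : 0 ≤ dx := abs_nonneg _
  have hdy0 : 0 ≤ dy := abs_nonneg _
  have hdz0 : 0 ≤ dz := abs_nonneg _
  have hxs : sx = 1 ∨ sx = -1 := by rw [hsx]; split_ifs <;> simp
  have hys : sy = 1 ∨ sy = -1 := by rw [hsy]; split_ifs <;> simp
  have hzs : sz = 1 ∨ sz = -1 := by rw [hsz]; split_ifs <;> simp
  have hx2 : x2 = x1 + sx * dx := by
    rw [hsx, hdx]; split_ifs with h
    · rw [abs_of_nonneg (by omega)]; ring
    · rw [abs_of_nonpos (by omega)]; ring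
  have hy2 : y2 = y1 + sy * dy := by
    rw [hsy, hdy]; split_ifs with h
    · rw [abs_of_nonneg (by omega)]; ring
    · rw [abs_of_nonpos (by omega)]; ring
  have hz2 : z2 = z1 + sz * dz := by
    rw [hsz, hdz]; split_ifs with h
    · rw [abs_of_nonneg (by omega)]; ring
    · rw [abs_of_nonpos (by omega)]; ring
  split_ifs with h1 h2
  · rw [pvLoopX_eq_pvG]
    exact pvBranch (fun a b c => [a, b, c]) dx dy dz sx sy sz x1 y1 z1 x2
      hdx0 hdy0 h1.1 hdz0 h1.2 hxs hx2
  · rw [pvLoopY_eq_pvG]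
    exact pvBranch (fun a b c => [b, a, c]) dy dx dz sy sx sz y1 x1 z1 y2
      hdy0 hdx0 h2.1 hdz0 h2.2 hys hy2
  · rw [pvLoopZ_eq_pvG]
    exact pvBranch (fun a b c => [c, b, a]) dz dy dx sz sy sx z1 y1 x1 z2
      hdz0 hdy0 (by omega) hdx0 (by omega) hzs hz2
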